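-- pv_equiv track=rewrite | github.com/Appypaw/algorithmStudy | Programmers/Basic/D18_x 사이의 개수.py | solution
-- ===== SOURCE A (Python) =====
-- def solution(myString):
--     answer = []
--     cnt = 0
--     for j in myString:
--         if j == 'x':
--             answer.append(cnt)
--             cnt = 0
--         else:
--             cnt += 1
--     answer.append(cnt)
--
--     return answer
-- ===== SOURCE B (Python) =====
-- def solution(myString):
--     return [len(s) for s in myString.split('x')]
-- ===== Notes on version B (the rewrite author's own statement) =====
-- stated objective: idiomatic
-- what changed: Replaces the per-character Python loop with a running counter reset at each delimiter by str.split on the delimiter plus mapping len over the segments (C-level split and len instead of interpreted per-character work).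
import Mathlib
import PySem

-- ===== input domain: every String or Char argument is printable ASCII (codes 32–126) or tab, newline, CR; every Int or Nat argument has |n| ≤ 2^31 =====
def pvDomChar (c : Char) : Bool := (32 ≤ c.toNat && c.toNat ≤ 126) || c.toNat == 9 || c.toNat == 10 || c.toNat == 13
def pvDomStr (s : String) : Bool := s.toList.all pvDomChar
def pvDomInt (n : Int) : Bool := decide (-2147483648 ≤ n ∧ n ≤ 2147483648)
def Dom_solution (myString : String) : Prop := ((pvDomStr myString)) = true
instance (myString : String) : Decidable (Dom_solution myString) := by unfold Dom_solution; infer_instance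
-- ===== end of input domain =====

-- B splits the string on 'x' and maps len over the segments; A walks characters with a counter reset at 'x'. Both are total; equivalence is exact.

-- ===== PORT A =====
-- answer/cnt loop, then the trailing append
def solution (myString : String) : List Int :=
  let st := myString.toList.foldl
    (fun (p : List Int × Int) j =>
      if j = 'x' then (p.1 ++ [p.2], 0) else (p.1, p.2 + 1))
    ([], 0)
  st.1 ++ [st.2]

-- ===== PORT B =====
def solution_alt (myString : String) : List Int :=
  (PySem.Chars.splitOn myString.toList ['x']).map (fun s => (s.length : Int))

-- ===== PRECONDITION & SPEC =====
def Spec_solution (myString : String) (out : List Int) : Prop := out = solution_alt myString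
instance (myString : String) (out : List Int) : Decidable (Spec_solution myString out) := by unfold Spec_solution; infer_instance

-- ===== CLAIM (what is proved, stated in full; the proofs are below) =====
def Claim_equal_solution : Prop := ∀ (myString : String), Dom_solution myString → Spec_solution myString (solution myString)

-- ===== LEMMAS AND PROOFS =====

-- the common specification: segment lengths with the current segment already cnt long
def lenSplit (cnt : Int) : List Char → List Int
  | [] => [cnt]
  | c :: rest => if c = 'x' then cnt :: lenSplit 0 rest else lenSplit (cnt + 1) rest

theorem foldl_lenSplit (l : List Char) (ans : List Int) (cnt : Int) :
    (let st := l.foldl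
        (fun (p : List Int × Int) j =>
          if j = 'x' then (p.1 ++ [p.2], 0) else (p.1, p.2 + 1))
        (ans, cnt);
      st.1 ++ [st.2]) = ans ++ lenSplit cnt l := by
  induction l generalizing ans cnt with
  | nil => simp [lenSplit]
  | cons c rest ih =>
    by_cases h : c = 'x' <;> simp [List.foldl, lenSplit, h, ih]

theorem go_lenSplit (fuel : Nat) (l cur : List Char) (acc : List (List Char))
    (h : l.length < fuel) :
    ((PySem.Chars.splitOn.go ['x'] fuel l cur acc).map (fun s => (s.length : Int)))
      = (acc.reverse.map (fun s => (s.length : Int))) ++ lenSplit cur.length l := by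
  induction fuel generalizing l cur acc with
  | zero => omega
  | succ fuel ih =>
    cases l with
    | nil => simp [PySem.Chars.splitOn.go, lenSplit]
    | cons c rest =>
      by_cases hc : c = 'x'
      · have hpre : List.isPrefixOf ['x'] (c :: rest) = true := by
          simp [List.isPrefixOf, hc]
        rw [PySem.Chars.splitOn.go]
        simp only [hpre, if_true]
        rw [ih _ _ _ (by simpa using Nat.lt_of_succ_lt_succ h)]
        simp [lenSplit, hc]
      · have hpre : List.isPrefixOf ['x'] (c :: rest) = false := by
          simp only [List.isPrefixOf, Bool.and_eq_false_iff, beq_eq_false_iff_ne]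
          exact Or.inl (Ne.symm hc)
        rw [PySem.Chars.splitOn.go]
        simp only [hpre, Bool.false_eq_true, if_false]
        rw [ih _ _ _ (by simpa using Nat.lt_of_succ_lt_succ h)]
        simp [lenSplit, hc]

-- ===== VERDICT (by name: the statement is the Claim_ definition above) =====
theorem solution_spec : Claim_equal_solution := by
  intro s _
  unfold Spec_solution solution solution_alt PySem.Chars.splitOn
  rw [go_lenSplit _ _ _ _ (by omega)]
  simpa using foldl_lenSplit s.toList [] 0
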